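-- pv_equiv track=rewrite | github.com/devdonghyun/Algorithm_Study | algorithm_class/Lesson2/position_33.py | position_33
-- ===== SOURCE A (Python) =====
-- def position_33(n, grid):
--     row, col, count, max_cnt = 0, 0, 0, 0
--     for row in range(n):
--         for col in range(n):
--             if row+2 >= n or col+2 >= n:
--                 continue
--
--             for i in range(row, row+3):
--                 for j in range(col, col+3):
--                     if grid[i][j] == 1:
--                         count += 1
--             if max_cnt < count:
--                 max_cnt = count
--             count = 0
--
--     return max_cnt
-- ===== SOURCE B (Python) =====
-- def position_33(n, grid):
--     # 3x3 sliding-window: keep a running window count per row band, updating 6 cells per shift.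
--     if n < 3:
--         return 0
--     best = 0
--     for r in range(n - 2):
--         s = 0
--         for i in range(r, r + 3):
--             for j in range(0, 3):
--                 if grid[i][j] == 1:
--                     s += 1
--         if s > best:
--             best = s
--         for c in range(1, n - 2):
--             for i in range(r, r + 3):
--                 if grid[i][c - 1] == 1:
--                     s -= 1
--                 if grid[i][c + 2] == 1:
--                     s += 1
--             if s > best:
--                 best = s
--     return best
-- ===== Notes on version B (the rewrite author's own statement) =====
-- stated objective: faster
-- what changed: B replaces A's full scan of all n*n positions with a 9-cell recount per window by a sliding window over the (n-2)*(n-2) top-left corners that maintains a running window count, updating only the 6 boundary cells per column shift.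
import Mathlib
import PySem

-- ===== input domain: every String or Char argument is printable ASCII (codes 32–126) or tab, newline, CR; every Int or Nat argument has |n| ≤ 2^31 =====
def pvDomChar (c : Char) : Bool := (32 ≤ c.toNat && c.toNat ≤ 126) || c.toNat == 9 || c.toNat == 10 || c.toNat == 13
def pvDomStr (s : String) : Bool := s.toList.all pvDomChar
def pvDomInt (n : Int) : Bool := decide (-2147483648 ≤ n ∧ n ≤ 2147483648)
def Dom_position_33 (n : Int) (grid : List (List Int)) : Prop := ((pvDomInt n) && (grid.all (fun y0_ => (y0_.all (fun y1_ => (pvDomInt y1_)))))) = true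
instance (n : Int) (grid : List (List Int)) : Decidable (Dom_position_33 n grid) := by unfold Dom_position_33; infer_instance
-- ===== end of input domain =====

-- B replaces A's per-window recount of all 9 cells by a sliding window that updates a running count with 6 cells per column shift (return value only; no mutation).

-- ===== PORT A =====
def position_33 (n : Int) (grid : List (List Int)) : Int :=
  let st := (PySem.List.pyRange 0 n 1).foldl (fun (st : Int × Int) row =>
      (PySem.List.pyRange 0 n 1).foldl (fun (st : Int × Int) col =>
        if n ≤ row + 2 ∨ n ≤ col + 2 then st
        else
          let count := (PySem.List.pyRange row (row + 3) 1).foldl (fun count i =>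
              (PySem.List.pyRange col (col + 3) 1).foldl (fun count j =>
                if PySem.List.pyGetD (PySem.List.pyGetD grid i []) j 0 = 1 then count + 1
                else count) count) st.1
          let max_cnt := if st.2 < count then count else st.2
          (0, max_cnt)) st) ((0, 0) : Int × Int)
  st.2

-- ===== PORT B =====
def position_33_alt (n : Int) (grid : List (List Int)) : Int :=
  if n < 3 then 0
  else
    (PySem.List.pyRange 0 (n - 2) 1).foldl (fun best r =>
      let s := (PySem.List.pyRange r (r + 3) 1).foldl (fun s i =>
          (PySem.List.pyRange 0 3 1).foldl (fun s j =>
            if PySem.List.pyGetD (PySem.List.pyGetD grid i []) j 0 = 1 then s + 1 else s) s) 0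
      let best := if s > best then s else best
      let sb := (PySem.List.pyRange 1 (n - 2) 1).foldl (fun (sb : Int × Int) c =>
          let s := (PySem.List.pyRange r (r + 3) 1).foldl (fun s i =>
              let s := if PySem.List.pyGetD (PySem.List.pyGetD grid i []) (c - 1) 0 = 1 then s - 1 else s
              if PySem.List.pyGetD (PySem.List.pyGetD grid i []) (c + 2) 0 = 1 then s + 1 else s) sb.1
          (s, if s > sb.2 then s else sb.2)) (s, best)
      sb.2) 0

-- ===== PRECONDITION & SPEC =====
-- Pre_ excludes exactly the inputs where A raises IndexError: when n ≥ 3, A reads rows 0..n-1 at columns 0..n-1.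
def Pre_position_33 (n : Int) (grid : List (List Int)) : Prop :=
  3 ≤ n → (n ≤ (grid.length : Int) ∧ ∀ r ∈ grid.take n.toNat, n ≤ (r.length : Int))
instance (n : Int) (grid : List (List Int)) : Decidable (Pre_position_33 n grid) := by
  unfold Pre_position_33; infer_instance
def pvWitness_position_33 : Int × List (List Int) := (3, [[1, 0, 0], [0, 1, 0], [0, 0, 1]])

def Spec_position_33 (n : Int) (grid : List (List Int)) (out : Int) : Prop := out = position_33_alt n grid
instance (n : Int) (grid : List (List Int)) (out : Int) : Decidable (Spec_position_33 n grid out) := by unfold Spec_position_33; infer_instance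

-- ===== CLAIM (what is proved, stated in full; the proofs are below) =====
def Claim_equal_position_33 : Prop := ∀ (n : Int) (grid : List (List Int)), Dom_position_33 n grid → Pre_position_33 n grid → Spec_position_33 n grid (position_33 n grid)

-- ===== LEMMAS AND PROOFS =====

-- indicator of a 1-cell, the 3x3 window count, and a 3-cell column strip
def pvInd (g : List (List Int)) (i j : Int) : Int :=
  if PySem.List.pyGetD (PySem.List.pyGetD g i []) j 0 = 1 then 1 else 0

def pvW (g : List (List Int)) (r c : Int) : Int :=
  pvInd g r c + pvInd g r (c+1) + pvInd g r (c+2) +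
  pvInd g (r+1) c + pvInd g (r+1) (c+1) + pvInd g (r+1) (c+2) +
  pvInd g (r+2) c + pvInd g (r+2) (c+1) + pvInd g (r+2) (c+2)

def pvCol (g : List (List Int)) (r c : Int) : Int :=
  pvInd g r c + pvInd g (r+1) c + pvInd g (r+2) c

-- fold functions of the common canonical form
def pvGM (g : List (List Int)) (r : Int) : Int → Int → Int := fun m c => max m (pvW g r c)
def pvInner (n : Int) (g : List (List Int)) (r m : Int) : Int :=
  (PySem.List.pyRange 0 (n - 2) 1).foldl (pvGM g r) m
def pvGA (n : Int) (g : List (List Int)) (r : Int) : Int → Int → Int :=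
  fun m c => if n ≤ r + 2 ∨ n ≤ c + 2 then m else max m (pvW g r c)
def pvRowA (n : Int) (g : List (List Int)) : Int → Int → Int :=
  fun m r => (PySem.List.pyRange 0 n 1).foldl (pvGA n g r) m

lemma pvRange3 (a : Int) : PySem.List.pyRange a (a + 3) 1 = [a, a + 1, a + 2] := by
  rw [PySem.List.pyRange_one_cons (by omega), PySem.List.pyRange_one_cons (by omega),
      PySem.List.pyRange_one_cons (by omega), PySem.List.pyRange_one_eq_nil (by omega)]
  simp [show a + 1 + 1 = a + 2 from by ring]

lemma pvIteIncr (p : Prop) [Decidable p] (a : Int) :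
    (if p then a + 1 else a) = a + (if p then 1 else 0) := by split <;> ring

lemma pvIteDecr (p : Prop) [Decidable p] (a : Int) :
    (if p then a - 1 else a) = a - (if p then 1 else 0) := by split <;> ring

lemma pvIteMax (m w : Int) : (if m < w then w else m) = max m w := by
  split <;> omega

-- the 9-cell double loop (A's window count, B's first window) adds exactly pvW
lemma pvCountLoop (g : List (List Int)) (r c a : Int) :
    (PySem.List.pyRange r (r + 3) 1).foldl (fun count i =>
        (PySem.List.pyRange c (c + 3) 1).foldl (fun count j =>
          if PySem.List.pyGetD (PySem.List.pyGetD g i []) j 0 = 1 then count + 1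
          else count) count) a = a + pvW g r c := by
  rw [pvRange3, pvRange3]
  simp only [List.foldl, pvIteIncr]
  simp only [pvW, pvInd]
  ring

lemma pvCountLoop0 (g : List (List Int)) (r a : Int) :
    (PySem.List.pyRange r (r + 3) 1).foldl (fun s i =>
        (PySem.List.pyRange 0 3 1).foldl (fun s j =>
          if PySem.List.pyGetD (PySem.List.pyGetD g i []) j 0 = 1 then s + 1 else s) s) a
      = a + pvW g r 0 := by
  have h := pvCountLoop g r 0 a
  simpa using h

-- B's 6-cell update loop
lemma pvUpdateLoop (g : List (List Int)) (r c a : Int) :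
    (PySem.List.pyRange r (r + 3) 1).foldl (fun s i =>
        let s := if PySem.List.pyGetD (PySem.List.pyGetD g i []) (c - 1) 0 = 1 then s - 1 else s
        if PySem.List.pyGetD (PySem.List.pyGetD g i []) (c + 2) 0 = 1 then s + 1 else s) a
      = a - pvCol g r (c - 1) + pvCol g r (c + 2) := by
  rw [pvRange3]
  simp only [List.foldl, pvIteIncr, pvIteDecr]
  simp only [pvCol, pvInd]
  ring

-- sliding identity: shifting the window one column right
lemma pvSlideUp (g : List (List Int)) (r c : Int) :
    pvW g r c - pvCol g r c + pvCol g r (c + 3) = pvW g r (c + 1) := by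
  simp only [pvW, pvCol, show c + 1 + 1 = c + 2 from by ring, show c + 1 + 2 = c + 3 from by ring]
  ring

-- generic fold helpers
lemma pvFoldCongr {α : Type} (f g : Int → α → Int) :
    ∀ (L : List α), (∀ m x, x ∈ L → f m x = g m x) → ∀ m : Int, L.foldl f m = L.foldl g m := by
  intro L
  induction L with
  | nil => intro _ _; rfl
  | cons x xs ih =>
      intro h m
      simp only [List.foldl]
      rw [h m x (by simp)]
      exact ih (fun m y hy => h m y (by simp [hy])) (g m x)

lemma pvFoldId {α : Type} (f : Int → α → Int) :
    ∀ (L : List α), (∀ m x, x ∈ L → f m x = m) → ∀ m : Int, L.foldl f m = m := by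
  intro L
  induction L with
  | nil => intro _ _; rfl
  | cons x xs ih =>
      intro h m
      simp only [List.foldl]
      rw [h m x (by simp)]
      exact ih (fun m y hy => h m y (by simp [hy])) m

lemma pvPairFold {α : Type} (L : List α) (step : Int × Int → α → Int × Int)
    (f : Int → α → Int) (h : ∀ m x, step (0, m) x = (0, f m x)) :
    ∀ m : Int, L.foldl step (0, m) = (0, L.foldl f m) := by
  induction L with
  | nil => intro m; rfl
  | cons x xs ih =>
      intro m
      simp only [List.foldl, h]
      exact ih (f m x)

-- A reduced to nested max-folds with the skip condition
lemma pvAeq (n : Int) (g : List (List Int)) :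
    position_33 n g = (PySem.List.pyRange 0 n 1).foldl (pvRowA n g) 0 := by
  unfold position_33
  have hcell : ∀ (r m c : Int),
      (fun (st : Int × Int) col =>
        if n ≤ r + 2 ∨ n ≤ col + 2 then st
        else
          let count := (PySem.List.pyRange r (r + 3) 1).foldl (fun count i =>
              (PySem.List.pyRange col (col + 3) 1).foldl (fun count j =>
                if PySem.List.pyGetD (PySem.List.pyGetD g i []) j 0 = 1 then count + 1
                else count) count) st.1
          let max_cnt := if st.2 < count then count else st.2
          (0, max_cnt)) (0, m) c = (0, pvGA n g r m c) := by
    intro r m c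
    by_cases hc : n ≤ r + 2 ∨ n ≤ c + 2
    · simp only [hc, if_true, pvGA]
    · simp only [hc, if_false, pvGA, pvCountLoop, zero_add, pvIteMax]
  have houter : ∀ (m r : Int),
      (PySem.List.pyRange 0 n 1).foldl (fun (st : Int × Int) col =>
        if n ≤ r + 2 ∨ n ≤ col + 2 then st
        else
          let count := (PySem.List.pyRange r (r + 3) 1).foldl (fun count i =>
              (PySem.List.pyRange col (col + 3) 1).foldl (fun count j =>
                if PySem.List.pyGetD (PySem.List.pyGetD g i []) j 0 = 1 then count + 1
                else count) count) st.1
          let max_cnt := if st.2 < count then count else st.2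
          (0, max_cnt)) (0, m) = (0, pvRowA n g m r) := by
    intro m r
    exact pvPairFold _ _ (pvGA n g r) (hcell r) m
  rw [pvPairFold _ _ (pvRowA n g) (fun m r => houter m r) 0]

-- for n < 3 both sides are 0
lemma pvAsmall (n : Int) (g : List (List Int)) (hn : n < 3) :
    position_33 n g = 0 := by
  rw [pvAeq]
  refine pvFoldId _ _ (fun m r hr => ?_) 0
  have hr0 : 0 ≤ r := (PySem.List.mem_pyRange_one.mp hr).1
  refine pvFoldId _ _ (fun m c _ => ?_) m
  simp only [pvGA, if_pos (Or.inl (by omega : n ≤ r + 2))]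

-- for n ≥ 3, A equals the canonical nested max-fold over the (n-2)×(n-2) corners
lemma pvAcanon (n : Int) (g : List (List Int)) (hn : 3 ≤ n) :
    position_33 n g
      = (PySem.List.pyRange 0 (n - 2) 1).foldl (fun m r => pvInner n g r m) 0 := by
  rw [pvAeq]
  rw [PySem.List.pyRange_one_append 0 (n - 2) n (by omega) (by omega), List.foldl_append]
  have htail : ∀ m : Int, (PySem.List.pyRange (n - 2) n 1).foldl (pvRowA n g) m = m := by
    refine pvFoldId _ _ (fun m r hr => ?_)
    have hr2 : n - 2 ≤ r := (PySem.List.mem_pyRange_one.mp hr).1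
    refine pvFoldId _ _ (fun m c _ => ?_) m
    simp only [pvGA, if_pos (Or.inl (by omega : n ≤ r + 2))]
  rw [htail]
  refine pvFoldCongr _ _ _ (fun m r hr => ?_) 0
  have hr2 : r < n - 2 := (PySem.List.mem_pyRange_one.mp hr).2
  show (PySem.List.pyRange 0 n 1).foldl (pvGA n g r) m = pvInner n g r m
  rw [PySem.List.pyRange_one_append 0 (n - 2) n (by omega) (by omega), List.foldl_append]
  have hhead : ∀ m : Int,
      (PySem.List.pyRange 0 (n - 2) 1).foldl (pvGA n g r) m
        = (PySem.List.pyRange 0 (n - 2) 1).foldl (pvGM g r) m := by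
    refine pvFoldCongr _ _ _ (fun m c hc => ?_)
    have hc2 : c < n - 2 := (PySem.List.mem_pyRange_one.mp hc).2
    simp only [pvGA, pvGM, if_neg (by omega : ¬ (n ≤ r + 2 ∨ n ≤ c + 2))]
  rw [hhead]
  refine pvFoldId _ _ (fun m c hc => ?_) _
  have hc2 : n - 2 ≤ c := (PySem.List.mem_pyRange_one.mp hc).1
  simp only [pvGA, if_pos (Or.inr (by omega : n ≤ c + 2))]

-- B's sliding-loop step function (definitionally B's inner fold body)
def pvStep (g : List (List Int)) (r : Int) (sb : Int × Int) (c : Int) : Int × Int :=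
  let s := (PySem.List.pyRange r (r + 3) 1).foldl (fun s i =>
      let s := if PySem.List.pyGetD (PySem.List.pyGetD g i []) (c - 1) 0 = 1 then s - 1 else s
      if PySem.List.pyGetD (PySem.List.pyGetD g i []) (c + 2) 0 = 1 then s + 1 else s) sb.1
  (s, if s > sb.2 then s else sb.2)

lemma pvIteMax' (m w : Int) : (if w > m then w else m) = max m w := by
  split <;> omega

lemma pvStepEq (g : List (List Int)) (r w b c : Int) :
    pvStep g r (w, b) c
      = (w - pvCol g r (c - 1) + pvCol g r (c + 2),
         max b (w - pvCol g r (c - 1) + pvCol g r (c + 2))) := by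
  unfold pvStep
  simp only [pvUpdateLoop, pvIteMax']

-- B's sliding inner loop maintains s = pvW g r c and accumulates the running max
lemma pvInnerB (g : List (List Int)) (r : Int) :
    ∀ (k : Nat) (m c b : Int), (m - (c + 1)).toNat = k →
      ((PySem.List.pyRange (c + 1) m 1).foldl (pvStep g r) (pvW g r c, b)).2
        = (PySem.List.pyRange (c + 1) m 1).foldl (pvGM g r) b := by
  intro k
  induction k with
  | zero =>
      intro m c b h
      rw [show PySem.List.pyRange (c + 1) m 1 = [] from PySem.List.pyRange_one_eq_nil (by omega)]
      rfl
  | succ k ih =>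
      intro m c b h
      rw [show PySem.List.pyRange (c + 1) m 1 = (c + 1) :: PySem.List.pyRange (c + 1 + 1) m 1 from
            PySem.List.pyRange_one_cons (by omega)]
      rw [List.foldl_cons, List.foldl_cons, pvStepEq,
          show c + 1 - 1 = c from by ring, show c + 1 + 2 = c + 3 from by ring, pvSlideUp]
      exact ih m (c + 1) (max b (pvW g r (c + 1))) (by omega)

lemma pvBrowCore (n : Int) (g : List (List Int)) (hn : 3 ≤ n) (r best : Int) :
    ((PySem.List.pyRange 1 (n - 2) 1).foldl (pvStep g r) (pvW g r 0, max best (pvW g r 0))).2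
      = pvInner n g r best := by
  have h := pvInnerB g r (n - 2 - (0 + 1)).toNat (n - 2) 0 (max best (pvW g r 0)) rfl
  simp only [zero_add] at h
  rw [h]
  unfold pvInner
  rw [show PySem.List.pyRange 0 (n - 2) 1 = 0 :: PySem.List.pyRange (0 + 1) (n - 2) 1 from
        PySem.List.pyRange_one_cons (by omega), List.foldl_cons]
  simp only [zero_add]
  rfl

-- B's row body equals the canonical inner fold
lemma pvBrow (n : Int) (g : List (List Int)) (hn : 3 ≤ n) (r best : Int) :
    (let s := (PySem.List.pyRange r (r + 3) 1).foldl (fun s i =>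
        (PySem.List.pyRange 0 3 1).foldl (fun s j =>
          if PySem.List.pyGetD (PySem.List.pyGetD g i []) j 0 = 1 then s + 1 else s) s) 0
     let best := if s > best then s else best
     let sb := (PySem.List.pyRange 1 (n - 2) 1).foldl (fun (sb : Int × Int) c =>
        let s := (PySem.List.pyRange r (r + 3) 1).foldl (fun s i =>
            let s := if PySem.List.pyGetD (PySem.List.pyGetD g i []) (c - 1) 0 = 1 then s - 1 else s
            if PySem.List.pyGetD (PySem.List.pyGetD g i []) (c + 2) 0 = 1 then s + 1 else s) sb.1
        (s, if s > sb.2 then s else sb.2)) (s, best)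
     sb.2) = pvInner n g r best := by
  show ((PySem.List.pyRange 1 (n - 2) 1).foldl (pvStep g r)
          ((PySem.List.pyRange r (r + 3) 1).foldl (fun s i =>
              (PySem.List.pyRange 0 3 1).foldl (fun s j =>
                if PySem.List.pyGetD (PySem.List.pyGetD g i []) j 0 = 1 then s + 1 else s) s) 0,
           if ((PySem.List.pyRange r (r + 3) 1).foldl (fun s i =>
              (PySem.List.pyRange 0 3 1).foldl (fun s j =>
                if PySem.List.pyGetD (PySem.List.pyGetD g i []) j 0 = 1 then s + 1 else s) s) 0) > best
           then ((PySem.List.pyRange r (r + 3) 1).foldl (fun s i =>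
              (PySem.List.pyRange 0 3 1).foldl (fun s j =>
                if PySem.List.pyGetD (PySem.List.pyGetD g i []) j 0 = 1 then s + 1 else s) s) 0)
           else best)).2 = pvInner n g r best
  rw [pvCountLoop0, zero_add, pvIteMax']
  exact pvBrowCore n g hn r best

lemma pvBeq (n : Int) (g : List (List Int)) (hn : 3 ≤ n) :
    position_33_alt n g
      = (PySem.List.pyRange 0 (n - 2) 1).foldl (fun m r => pvInner n g r m) 0 := by
  unfold position_33_alt
  rw [if_neg (by omega : ¬ n < 3)]
  exact pvFoldCongr _ _ _ (fun m r _ => pvBrow n g hn r m) 0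

-- ===== VERDICT (by name: the statement is the Claim_ definition above) =====
theorem position_33_spec : Claim_equal_position_33 := by
  intro n grid _ _
  unfold Spec_position_33
  by_cases hn : n < 3
  · rw [pvAsmall n grid hn]
    unfold position_33_alt
    rw [if_pos hn]
  · rw [pvAcanon n grid (by omega), pvBeq n grid (by omega)]
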